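-- pv_equiv track=rewrite | github.com/CSUAuroraLab/ACTF_Junior_2020 | Crypto/难题/crypto-TinySPN/solution/util.py | trans_inv
-- ===== SOURCE A (Python) =====
-- SZ = 8
--
-- def trans_inv(blk):
--     res = []
--     for k in range(0, SZ, 8):
--         a = [0, 0, 0, 0, 0, 0, 0, 0]
--         for txt in blk[k:k+8]:
--             for i in range(7,-1,-1):
--                 a[i] *= 2
--                 a[i] |= txt&1
--                 txt //= 2
--         res += a
--     return res
-- ===== SOURCE B (Python) =====
-- SZ = 8
--
-- def trans_inv(blk):
--     res = []
--     for k in range(0, SZ, 8):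
--         part = blk[k:k+8]
--         for i in range(8):
--             w = 0
--             for txt in part:
--                 w = w * 2 | ((txt >> (7 - i)) & 1)
--             res.append(w)
--     return res
-- ===== Notes on version B (the rewrite author's own statement) =====
-- stated objective: simpler
-- what changed: Loop interchange: instead of distributing each byte's bits into all eight accumulators via in-place list mutation and repeated floor division, B computes each output word independently by folding over the block once per output index, extracting the needed bit with a shift.
import Mathlib
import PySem

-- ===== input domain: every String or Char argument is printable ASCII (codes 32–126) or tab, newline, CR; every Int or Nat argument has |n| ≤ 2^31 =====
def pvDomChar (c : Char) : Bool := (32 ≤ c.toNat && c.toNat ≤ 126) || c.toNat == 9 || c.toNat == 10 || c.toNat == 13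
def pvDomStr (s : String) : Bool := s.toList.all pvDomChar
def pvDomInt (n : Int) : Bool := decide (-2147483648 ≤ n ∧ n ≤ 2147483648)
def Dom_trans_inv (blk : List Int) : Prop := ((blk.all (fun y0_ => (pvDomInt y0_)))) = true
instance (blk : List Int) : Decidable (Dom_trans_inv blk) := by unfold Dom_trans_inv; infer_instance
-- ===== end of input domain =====

-- B swaps the nested loops: each of the 8 output words is produced by one fold over the block,
-- extracting its bit with a shift, instead of mutating all 8 accumulators per byte (objective: simpler).


-- ===== PORT A =====
-- innermost body of A: a[i] *= 2; a[i] |= txt & 1; txt //= 2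
def transInvStepA (s : List Int × Int) (i : Int) : List Int × Int :=
  let a := s.1
  let txt := s.2
  let v := PySem.List.pyGetD a i 0 * 2
  let v := PySem.Int.bor v (PySem.Int.band txt 1)
  (PySem.List.pySetD a i v, PySem.Int.floordiv txt 2)

def trans_inv (blk : List Int) : List Int :=
  (PySem.List.pyRange 0 8 8).foldl (fun res k =>
    let a : List Int := [0, 0, 0, 0, 0, 0, 0, 0]
    let a := (PySem.List.slice blk (some k) (some (k + 8))).foldl
      (fun a txt => ((PySem.List.pyRange 7 (-1) (-1)).foldl transInvStepA (a, txt)).1) a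
    res ++ a) []

-- ===== PORT B =====
def trans_inv_alt (blk : List Int) : List Int :=
  (PySem.List.pyRange 0 8 8).foldl (fun res k =>
    let part := PySem.List.slice blk (some k) (some (k + 8))
    (PySem.List.pyRange 0 8 1).foldl (fun res i =>
      res ++ [part.foldl (fun (w txt : Int) =>
        PySem.Int.bor (w * 2) (PySem.Int.band (Int.shiftRight txt (7 - i).toNat) 1)) 0]) res) []

-- ===== PRECONDITION & SPEC =====
def Spec_trans_inv (blk : List Int) (out : List Int) : Prop := out = trans_inv_alt blk
instance (blk : List Int) (out : List Int) : Decidable (Spec_trans_inv blk out) := by unfold Spec_trans_inv; infer_instance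

-- ===== CLAIM (what is proved, stated in full; the proofs are below) =====
def Claim_equal_trans_inv : Prop := ∀ (blk : List Int), Dom_trans_inv blk → Spec_trans_inv blk (trans_inv blk)

-- ===== LEMMAS AND PROOFS =====

-- abbreviation for one floor-halving step of A's txt
def fd (t : Int) : Int := PySem.Int.floordiv t 2

lemma fd_shift (t : Int) : fd t = Int.shiftRight t 1 := by
  rcases t with m | m
  · show Int.fdiv (Int.ofNat m) 2 = Int.ofNat (m >>> 1)
    rcases m with _ | m <;> simp [Int.fdiv, Nat.shiftRight_eq_div_pow]
  · show Int.fdiv (Int.negSucc m) 2 = Int.negSucc (m >>> 1)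
    simp [Int.fdiv, Nat.shiftRight_eq_div_pow]

lemma shift_shift (t : Int) (m n : Nat) :
    Int.shiftRight (Int.shiftRight t m) n = Int.shiftRight t (m + n) :=
  (Int.shiftRight_add t m n).symm

lemma shift_zero (t : Int) : Int.shiftRight t 0 = t := by rcases t with m | m <;> rfl

-- one byte through A's innermost loop, on an explicit 8-slot accumulator
lemma stepA_unfold (a0 a1 a2 a3 a4 a5 a6 a7 txt : Int) :
    ((PySem.List.pyRange 7 (-1) (-1)).foldl transInvStepA ([a0,a1,a2,a3,a4,a5,a6,a7], txt)).1 =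
    [PySem.Int.bor (a0*2) (PySem.Int.band (fd (fd (fd (fd (fd (fd (fd txt))))))) 1),
     PySem.Int.bor (a1*2) (PySem.Int.band (fd (fd (fd (fd (fd (fd txt)))))) 1),
     PySem.Int.bor (a2*2) (PySem.Int.band (fd (fd (fd (fd (fd txt))))) 1),
     PySem.Int.bor (a3*2) (PySem.Int.band (fd (fd (fd (fd txt)))) 1),
     PySem.Int.bor (a4*2) (PySem.Int.band (fd (fd (fd txt))) 1),
     PySem.Int.bor (a5*2) (PySem.Int.band (fd (fd txt)) 1),
     PySem.Int.bor (a6*2) (PySem.Int.band (fd txt) 1),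
     PySem.Int.bor (a7*2) (PySem.Int.band txt 1)] := by
  rw [show PySem.List.pyRange 7 (-1) (-1) = [7,6,5,4,3,2,1,0] from by decide]
  simp only [List.foldl_cons, List.foldl_nil, transInvStepA]
  simp [PySem.List.pyGetD_ofNat', PySem.List.pySetD_of_nonneg, fd, List.set, List.getD]

-- loop interchange: folding bytes through A's 8-slot update equals eight independent bit-folds
lemma key (part : List Int) : ∀ (a0 a1 a2 a3 a4 a5 a6 a7 : Int),
    part.foldl (fun a txt =>
        ((PySem.List.pyRange 7 (-1) (-1)).foldl transInvStepA (a, txt)).1)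
      [a0, a1, a2, a3, a4, a5, a6, a7]
    = [part.foldl (fun (w txt : Int) => PySem.Int.bor (w * 2) (PySem.Int.band (Int.shiftRight txt ((7:Int) - (0:Int)).toNat) 1)) a0,
       part.foldl (fun (w txt : Int) => PySem.Int.bor (w * 2) (PySem.Int.band (Int.shiftRight txt ((7:Int) - (1:Int)).toNat) 1)) a1,
       part.foldl (fun (w txt : Int) => PySem.Int.bor (w * 2) (PySem.Int.band (Int.shiftRight txt ((7:Int) - (2:Int)).toNat) 1)) a2,
       part.foldl (fun (w txt : Int) => PySem.Int.bor (w * 2) (PySem.Int.band (Int.shiftRight txt ((7:Int) - (3:Int)).toNat) 1)) a3,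
       part.foldl (fun (w txt : Int) => PySem.Int.bor (w * 2) (PySem.Int.band (Int.shiftRight txt ((7:Int) - (4:Int)).toNat) 1)) a4,
       part.foldl (fun (w txt : Int) => PySem.Int.bor (w * 2) (PySem.Int.band (Int.shiftRight txt ((7:Int) - (5:Int)).toNat) 1)) a5,
       part.foldl (fun (w txt : Int) => PySem.Int.bor (w * 2) (PySem.Int.band (Int.shiftRight txt ((7:Int) - (6:Int)).toNat) 1)) a6,
       part.foldl (fun (w txt : Int) => PySem.Int.bor (w * 2) (PySem.Int.band (Int.shiftRight txt ((7:Int) - (7:Int)).toNat) 1)) a7] := by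
  induction part with
  | nil => intro a0 a1 a2 a3 a4 a5 a6 a7; rfl
  | cons t rest ih =>
    intro a0 a1 a2 a3 a4 a5 a6 a7
    simp only [List.foldl_cons]
    rw [stepA_unfold, ih]
    simp [fd_shift, shift_shift, shift_zero]

-- ===== VERDICT (by name: the statement is the Claim_ definition above) =====
theorem trans_inv_spec : Claim_equal_trans_inv := by
  intro blk _
  show trans_inv blk = trans_inv_alt blk
  unfold trans_inv trans_inv_alt
  rw [show PySem.List.pyRange 0 8 8 = [0] from by decide,
      show PySem.List.pyRange 0 8 1 = [0,1,2,3,4,5,6,7] from by decide]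
  simp only [List.foldl_cons, List.foldl_nil]
  rw [key]
  rfl
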